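-- pv_equiv track=rewrite | github.com/zqifdu/py_data_structures | dynamic_programming/rod_cutting.py | bottom_up_cut_rod_solution
-- ===== SOURCE A (Python) =====
-- def bottom_up_cut_rod(p, n):
--     # Initialization of revenue list
--     r = [0]*(n+1)
--
--     for i in range(1, n+1):
--         q = -1
--         for j in range(1, i+1):
--             # Compare p[j-1] + bottom_up_cut_rod(p, i-j+1) and p[j] + bottom_up_cut_rod(p, i-j)
--             q = max(q, p[j]+bottom_up_cut_rod(p, i-j))
--         r[i] = q
--     return r[n]
--
-- def bottom_up_cut_rod_solution(p, n):
--     r = [0] * (n+1)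
--     s = [0] * (n+1)
--
--     for i in range(1, n+1):
--         q = -1
--         for j in range(1, i+1):
--             if q < p[j] + bottom_up_cut_rod(p, i-j):
--                 q = p[j] + bottom_up_cut_rod(p, i-j)
--                 s[i] = j
--
--         r[i] = q
--
--     return s
-- ===== SOURCE B (Python) =====
-- def bottom_up_cut_rod_solution(p, n):
--     # Classic bottom-up rod-cutting DP: build the optimal-revenue table r
--     # once and read r[i-j] from it, recording in s[i] the first cut of an
--     # optimal solution for length i.
--     r = [0] * (n + 1)
--     s = [0] * (n + 1)
--     for i in range(1, n + 1):
--         q = -1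
--         for j in range(1, i + 1):
--             if q < p[j] + r[i - j]:
--                 q = p[j] + r[i - j]
--                 s[i] = j
--         r[i] = q
--     return s
-- ===== Notes on version B (the rewrite author's own statement) =====
-- stated objective: alternative
-- what changed: B builds the optimal-revenue table r bottom-up once and reads r[i-j] from it, replacing A's recursive recomputation via bottom_up_cut_rod(p, i-j); Pre_ only excludes inputs where A raises IndexError (n >= 1 with len(p) <= n).
import Mathlib
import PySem

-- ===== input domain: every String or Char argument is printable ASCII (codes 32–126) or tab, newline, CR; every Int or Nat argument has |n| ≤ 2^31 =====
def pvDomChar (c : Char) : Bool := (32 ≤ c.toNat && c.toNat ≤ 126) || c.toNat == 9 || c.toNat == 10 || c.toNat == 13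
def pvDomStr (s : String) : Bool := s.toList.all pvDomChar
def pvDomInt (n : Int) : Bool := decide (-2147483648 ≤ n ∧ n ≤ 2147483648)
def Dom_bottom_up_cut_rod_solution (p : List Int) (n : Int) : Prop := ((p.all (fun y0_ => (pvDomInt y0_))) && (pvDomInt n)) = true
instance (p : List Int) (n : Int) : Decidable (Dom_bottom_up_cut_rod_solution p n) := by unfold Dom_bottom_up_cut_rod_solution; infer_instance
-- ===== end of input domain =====

-- B replaces A's recursive recomputation of the optimal revenues by the bottom-up
-- memo table r read as r[i-j] (objective: alternative).

-- ===== PORT A =====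
-- helper: Python's recursive `bottom_up_cut_rod(p, n)` (only ever called with n ≥ 0 here,
-- so the argument is a Nat); p[j] is pyGet? totalized with .getD 0 — Pre_ excludes the
-- out-of-range (IndexError) inputs (B raises there too, so nothing is claimed).
def cutRodA (p : List Int) (m : Nat) : Int :=
  let r0 : List Int := List.replicate (m+1) 0
  let r := (List.range' 1 m).attach.foldl
    (fun r i =>
      let q := (List.range' 1 i.1).attach.foldl
        (fun q j => max q ((PySem.List.pyGet? p ((j.1 : Nat) : Int)).getD 0 + cutRodA p (i.1 - j.1)))
        (-1)
      r.set i.1 q) r0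
  r.getD m 0
termination_by m
decreasing_by
  have hi := List.mem_range'_1.mp i.2
  have hj := List.mem_range'_1.mp j.2
  omega

-- Python's `bottom_up_cut_rod_solution`: the list r is written (r[i] = q) but never read
-- for the returned s, so it is not carried; q and s are the inner loop's state.
def bottom_up_cut_rod_solution (p : List Int) (n : Int) : List Int :=
  let s0 : List Int := List.replicate ((n+1).toNat) 0
  (List.range' 1 n.toNat).foldl
    (fun s i =>
      ((List.range' 1 i).foldl
        (fun (qs : Int × List Int) j =>
          let c := (PySem.List.pyGet? p ((j : Nat) : Int)).getD 0 + cutRodA p (i - j)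
          if qs.1 < c then (c, qs.2.set i ((j : Nat) : Int)) else qs)
        (-1, s)).2)
    s0

-- ===== PORT B =====
-- transliteration of Source B: the pair (r, s) is the loop state; r[i-j] is a read of the
-- table (always in range in Python, totalized with getD).
def bottom_up_cut_rod_solution_alt (p : List Int) (n : Int) : List Int :=
  let r0 : List Int := List.replicate ((n+1).toNat) 0
  let s0 : List Int := List.replicate ((n+1).toNat) 0
  ((List.range' 1 n.toNat).foldl
    (fun (rs : List Int × List Int) i =>
      let qs := (List.range' 1 i).foldl
        (fun (qs : Int × List Int) j =>
          let c := (PySem.List.pyGet? p ((j : Nat) : Int)).getD 0 + rs.1.getD (i - j) 0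
          if qs.1 < c then (c, qs.2.set i ((j : Nat) : Int)) else qs)
        (-1, rs.2)
      (rs.1.set i qs.1, qs.2))
    (r0, s0)).2

-- ===== PRECONDITION & SPEC =====
-- Pre_ excludes exactly the inputs where Python A raises IndexError (p[j] for j up to n):
-- when n ≥ 1 the list p must have more than n entries.  (B raises there as well.)
def Pre_bottom_up_cut_rod_solution (p : List Int) (n : Int) : Prop :=
  n ≤ 0 ∨ n < (p.length : Int)
instance (p : List Int) (n : Int) : Decidable (Pre_bottom_up_cut_rod_solution p n) := by
  unfold Pre_bottom_up_cut_rod_solution; infer_instance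

def pvWitness_bottom_up_cut_rod_solution : List Int × Int := ([1, 5, 8, 9], 3)

def Spec_bottom_up_cut_rod_solution (p : List Int) (n : Int) (out : List Int) : Prop := out = bottom_up_cut_rod_solution_alt p n
instance (p : List Int) (n : Int) (out : List Int) : Decidable (Spec_bottom_up_cut_rod_solution p n out) := by unfold Spec_bottom_up_cut_rod_solution; infer_instance

-- ===== CLAIM (what is proved, stated in full; the proofs are below) =====
def Claim_equal_bottom_up_cut_rod_solution : Prop := ∀ (p : List Int) (n : Int), Dom_bottom_up_cut_rod_solution p n → Pre_bottom_up_cut_rod_solution p n → Spec_bottom_up_cut_rod_solution p n (bottom_up_cut_rod_solution p n)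

-- ===== LEMMAS AND PROOFS =====

-- candidate value p[j] + cutRodA p (i - j)
def candA (p : List Int) (i j : Nat) : Int :=
  (PySem.List.pyGet? p ((j : Nat) : Int)).getD 0 + cutRodA p (i - j)

-- proof-side names for the two outer-loop bodies (definitionally the ports' loop bodies)
def stepA (p : List Int) : List Int → Nat → List Int :=
  fun s i =>
    ((List.range' 1 i).foldl
      (fun (qs : Int × List Int) j =>
        if qs.1 < candA p i j then (candA p i j, qs.2.set i ((j : Nat) : Int)) else qs)
      (-1, s)).2

def stepB (p : List Int) : (List Int × List Int) → Nat → (List Int × List Int) :=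
  fun rs i =>
    let qs := (List.range' 1 i).foldl
      (fun (qs : Int × List Int) j =>
        let c := (PySem.List.pyGet? p ((j : Nat) : Int)).getD 0 + rs.1.getD (i - j) 0
        if qs.1 < c then (c, qs.2.set i ((j : Nat) : Int)) else qs)
      (-1, rs.2)
    (rs.1.set i qs.1, qs.2)

lemma cutRodA_zero (p : List Int) : cutRodA p 0 = 0 := by
  rw [cutRodA]; rfl

lemma inner_unattach (p : List Int) (i : Nat) :
    (List.range' 1 i).attach.foldl
        (fun q j => max q ((PySem.List.pyGet? p ((j.1 : Nat) : Int)).getD 0 + cutRodA p (i - j.1)))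
        (-1)
      = (List.range' 1 i).foldl (fun q j => max q (candA p i j)) (-1) :=
  List.foldl_attach (f := fun q j => max q (candA p i j))

lemma outer_unattach (p : List Int) (l : List Nat) (r0 : List Int) :
    l.attach.foldl
        (fun r i => r.set i.1 ((List.range' 1 i.1).foldl (fun q j => max q (candA p i.1 j)) (-1))) r0
      = l.foldl
        (fun r i => r.set i ((List.range' 1 i).foldl (fun q j => max q (candA p i j)) (-1))) r0 :=
  List.foldl_attach (f := fun (r : List Int) i => r.set i ((List.range' 1 i).foldl (fun q j => max q (candA p i j)) (-1)))

lemma length_foldl_set (g : Nat → Int) (l : List Nat) (r0 : List Int) :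
    (l.foldl (fun r i => r.set i (g i)) r0).length = r0.length := by
  induction l generalizing r0 with
  | nil => rfl
  | cons a t ih => simp [List.foldl_cons, ih]

lemma cutRodA_succ (p : List Int) (m : Nat) :
    cutRodA p (m+1)
      = (List.range' 1 (m+1)).foldl (fun q j => max q (candA p (m+1) j)) (-1) := by
  rw [cutRodA]
  simp only [inner_unattach]
  rw [outer_unattach]
  rw [List.range'_1_concat, List.foldl_append]
  simp only [List.foldl_cons, List.foldl_nil]
  rw [List.getD_eq_getElem?_getD]
  rw [show 1 + m = m + 1 from Nat.add_comm 1 m]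
  rw [List.getElem?_set_self (by rw [length_foldl_set]; simp)]
  rw [List.range'_1_concat]
  simp [Nat.add_comm 1 m]

-- the first component of the record-scan fold is the running maximum
lemma inner_fst (c : Nat → Int) (i : Nat) :
    ∀ (js : List Nat) (q0 : Int) (s : List Int),
      (js.foldl (fun (qs : Int × List Int) j =>
          if qs.1 < c j then (c j, qs.2.set i ((j : Nat) : Int)) else qs) (q0, s)).1
        = js.foldl (fun q j => max q (c j)) q0 := by
  intro js
  induction js with
  | nil => intro q0 s; rfl
  | cons j t ih =>
    intro q0 s
    simp only [List.foldl_cons]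
    by_cases h : q0 < c j
    · rw [if_pos h, ih, max_eq_right h.le]
    · rw [if_neg h, ih, max_eq_left (le_of_not_gt h)]

-- the record-scan fold only depends on the candidate values on the scanned indices
lemma inner_congr (c c' : Nat → Int) (i : Nat) :
    ∀ (js : List Nat), (∀ j ∈ js, c j = c' j) → ∀ (q0 : Int) (s : List Int),
      js.foldl (fun (qs : Int × List Int) j =>
          if qs.1 < c j then (c j, qs.2.set i ((j : Nat) : Int)) else qs) (q0, s)
        = js.foldl (fun (qs : Int × List Int) j =>
          if qs.1 < c' j then (c' j, qs.2.set i ((j : Nat) : Int)) else qs) (q0, s) := by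
  intro js
  induction js with
  | nil => intro _ q0 s; rfl
  | cons j t ih =>
    intro h q0 s
    simp only [List.foldl_cons, h j List.mem_cons_self]
    by_cases hc : q0 < c' j
    · rw [if_pos hc]; exact ih (fun j hj => h j (List.mem_cons_of_mem _ hj)) _ _
    · rw [if_neg hc]; exact ih (fun j hj => h j (List.mem_cons_of_mem _ hj)) _ _

-- main invariant: after m outer iterations, B's table r holds the cutRodA values on
-- indices 0..m (zeros beyond), and A's and B's s lists coincide
lemma main_inv (p : List Int) (N : Nat) : ∀ m, m ≤ N →
    ((List.range' 1 m).foldl (stepB p) (List.replicate (N+1) 0, List.replicate (N+1) 0)).1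
        = (List.range (m+1)).map (cutRodA p) ++ List.replicate (N - m) 0
    ∧ (List.range' 1 m).foldl (stepA p) (List.replicate (N+1) 0)
        = ((List.range' 1 m).foldl (stepB p) (List.replicate (N+1) 0, List.replicate (N+1) 0)).2 := by
  intro m
  induction m with
  | zero =>
    intro _
    constructor
    · simp [List.range'_zero, List.range_succ, cutRodA_zero, List.replicate_succ]
    · simp [List.range'_zero]
  | succ m ih =>
    intro hm
    obtain ⟨h1, h2⟩ := ih (Nat.le_of_succ_le hm)
    rw [List.range'_1_concat, show 1 + m = m + 1 from Nat.add_comm 1 m]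
    simp only [List.foldl_append, List.foldl_cons, List.foldl_nil]
    set F := (List.range' 1 m).foldl (stepB p)
      ((List.replicate (N+1) 0, List.replicate (N+1) 0) : List Int × List Int) with hF
    -- B's candidates at iteration m+1 equal A's candA values
    have hcand : ∀ j ∈ List.range' 1 (m+1),
        (PySem.List.pyGet? p ((j : Nat) : Int)).getD 0 + F.1.getD (m+1 - j) 0 = candA p (m+1) j := by
      intro j hj
      have hj' := List.mem_range'_1.mp hj
      have hlt : m + 1 - j < ((List.range (m+1)).map (cutRodA p)).length := by
        rw [List.length_map, List.length_range]; omega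
      have : F.1.getD (m+1-j) 0 = cutRodA p (m+1-j) := by
        rw [h1, List.getD_eq_getElem?_getD, List.getElem?_append_left hlt,
          List.getElem?_eq_getElem hlt]
        simp
      rw [this]; rfl
    have hcongr := inner_congr
      (fun j => (PySem.List.pyGet? p ((j : Nat) : Int)).getD 0 + F.1.getD (m+1 - j) 0)
      (candA p (m+1)) (m+1) (List.range' 1 (m+1)) hcand (-1) F.2
    constructor
    · -- table component: the new entry is cutRodA p (m+1)
      show (F.1.set (m+1) _) = _
      rw [hcongr, inner_fst, ← cutRodA_succ, h1]
      rw [List.set_append, if_neg (by rw [List.length_map, List.length_range]; omega)]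
      rw [List.length_map, List.length_range, Nat.sub_self]
      rw [show N - m = (N - (m+1)) + 1 by omega, List.replicate_succ, List.set_cons_zero]
      simp [List.range_succ]
    · -- s component: the two inner folds are the same fold from the same state
      show stepA p ((List.range' 1 m).foldl (stepA p) (List.replicate (N+1) 0)) (m+1) = _
      rw [h2]
      show ((List.range' 1 (m+1)).foldl
        (fun (qs : Int × List Int) j =>
          if qs.1 < candA p (m+1) j then (candA p (m+1) j, qs.2.set (m+1) ((j : Nat) : Int)) else qs)
        (-1, F.2)).2 = _
      rw [← hcongr]
      rfl

-- ===== VERDICT (by name: the statement is the Claim_ definition above) =====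
theorem bottom_up_cut_rod_solution_spec : Claim_equal_bottom_up_cut_rod_solution := by
  intro p n _ _
  unfold Spec_bottom_up_cut_rod_solution
  unfold bottom_up_cut_rod_solution bottom_up_cut_rod_solution_alt
  by_cases hn : n < 0
  · rw [show (n+1).toNat = 0 by omega, show n.toNat = 0 by omega]
    simp [List.range'_zero]
  · rw [show (n+1).toNat = n.toNat + 1 by omega]
    exact (main_inv p n.toNat n.toNat le_rfl).2
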